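-- pv_equiv track=rewrite | github.com/spectrallogic/BetterLearning | expandformer_v6.py | _create_sub_specializations
-- ===== SOURCE A (Python) =====
-- def _create_sub_specializations(token_ids, flash_scanner, num_groups):
--     """Divide tokens into sub-specialization groups"""
--     # Simple clustering by frequency
--     tokens_per_group = len(token_ids) // num_groups
--
--     sub_clusters = []
--     for i in range(num_groups):
--         start = i * tokens_per_group
--         end = start + tokens_per_group if i < num_groups - 1 else len(token_ids)
--         sub_clusters.append(set(token_ids[start:end]))
--
--     return sub_clusters
-- ===== SOURCE B (Python) =====
-- def _create_sub_specializations(token_ids, flash_scanner, num_groups):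
--     """Divide tokens into sub-specialization groups.
--
--     Different decomposition: instead of index arithmetic over the original
--     list, repeatedly peel a fixed-size chunk off the front of the remaining
--     tokens; the final chunk absorbs the remainder."""
--     tokens_per_group = len(token_ids) // num_groups  # same ZeroDivisionError when num_groups == 0
--
--     rest = iter(token_ids)
--     groups = []
--     k = num_groups
--     while k > 1:
--         groups.append(set(x for _, x in zip(range(tokens_per_group), rest)))
--         k -= 1
--     if k == 1:
--         groups.append(set(rest))
--     return groups
-- ===== Notes on version B (the rewrite author's own statement) =====
-- stated objective: alternative
-- what changed: Replaced the index-arithmetic loop over range(num_groups) that slices the original list at computed offsets by a loop that peels a fixed-size chunk off the front of the remaining list, consuming the tokens once, with the final chunk absorbing the remainder.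
import Mathlib
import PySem

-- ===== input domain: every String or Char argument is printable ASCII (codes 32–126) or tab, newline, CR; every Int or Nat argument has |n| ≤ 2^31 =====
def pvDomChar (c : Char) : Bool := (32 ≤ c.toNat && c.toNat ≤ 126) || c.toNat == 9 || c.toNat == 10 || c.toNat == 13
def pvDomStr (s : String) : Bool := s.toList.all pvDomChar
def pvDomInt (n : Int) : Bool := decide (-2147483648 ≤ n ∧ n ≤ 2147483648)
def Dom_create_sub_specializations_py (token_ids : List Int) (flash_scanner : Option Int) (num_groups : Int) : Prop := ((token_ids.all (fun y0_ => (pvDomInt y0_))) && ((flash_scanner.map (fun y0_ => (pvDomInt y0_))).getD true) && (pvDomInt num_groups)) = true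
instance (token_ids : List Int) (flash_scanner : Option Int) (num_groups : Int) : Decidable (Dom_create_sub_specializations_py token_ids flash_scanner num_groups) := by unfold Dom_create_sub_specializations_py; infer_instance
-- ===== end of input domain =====

-- ===== PORT A =====
def create_sub_specializations_py (token_ids : List Int) (flash_scanner : Option Int) (num_groups : Int) : List (List Int) :=
  let tokens_per_group := PySem.Int.floordiv (token_ids.length : Int) num_groups
  (PySem.List.pyRange 0 num_groups 1).foldl
    (fun sub_clusters i =>
      let start := i * tokens_per_group
      let «end» := if i < num_groups - 1 then start + tokens_per_group else (token_ids.length : Int)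
      sub_clusters ++ [PySem.Set.ofList (PySem.List.slice token_ids (some start) (some «end»))])
    []

-- ===== PORT B =====
-- B-side helper: Source B's chunk-peeling loop (while k > 1: take tokens_per_group items off the front of rest; if k == 1: the remainder)
-- as the obvious structural recursion on k; 'rest' (Source B's iterator position) is the not-yet-consumed suffix list
def csspBuild (tokens_per_group : Int) (rest : List Int) (k : Int) : List (List Int) :=
  if _h0 : k ≤ 0 then []
  else if _h1 : k = 1 then [PySem.Set.ofList rest]
  else PySem.Set.ofList (PySem.List.slice rest none (some tokens_per_group)) ::
       csspBuild tokens_per_group (PySem.List.slice rest (some tokens_per_group) none) (k - 1)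
termination_by k.toNat
decreasing_by omega

def create_sub_specializations_py_alt (token_ids : List Int) (flash_scanner : Option Int) (num_groups : Int) : List (List Int) :=
  let tokens_per_group := PySem.Int.floordiv (token_ids.length : Int) num_groups
  csspBuild tokens_per_group token_ids num_groups

-- ===== PRECONDITION & SPEC =====
-- Pre_ excludes exactly num_groups = 0, where A raises ZeroDivisionError.
def Pre_create_sub_specializations_py (token_ids : List Int) (flash_scanner : Option Int) (num_groups : Int) : Prop := num_groups ≠ 0
instance (token_ids : List Int) (flash_scanner : Option Int) (num_groups : Int) : Decidable (Pre_create_sub_specializations_py token_ids flash_scanner num_groups) := by unfold Pre_create_sub_specializations_py; infer_instance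
def pvWitness_create_sub_specializations_py : List Int × Option Int × Int := ([1, 2, 2, 3, 4], none, 2)
def Spec_create_sub_specializations_py (token_ids : List Int) (flash_scanner : Option Int) (num_groups : Int) (out : List (List Int)) : Prop := out = create_sub_specializations_py_alt token_ids flash_scanner num_groups
instance (token_ids : List Int) (flash_scanner : Option Int) (num_groups : Int) (out : List (List Int)) : Decidable (Spec_create_sub_specializations_py token_ids flash_scanner num_groups out) := by unfold Spec_create_sub_specializations_py; infer_instance

-- ===== CLAIM (what is proved, stated in full; the proofs are below) =====
def Claim_equal_create_sub_specializations_py : Prop := ∀ (token_ids : List Int) (flash_scanner : Option Int) (num_groups : Int), Dom_create_sub_specializations_py token_ids flash_scanner num_groups → Pre_create_sub_specializations_py token_ids flash_scanner num_groups → Spec_create_sub_specializations_py token_ids flash_scanner num_groups (create_sub_specializations_py token_ids flash_scanner num_groups)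

-- ===== LEMMAS AND PROOFS =====

-- Main lemma: for positive k counting the groups still to build, the map of A's
-- per-index slice over the remaining range equals B's recursion on the dropped list.
lemma cssp_build_eq (xs : List Int) (ng t : Int) (ht : 0 ≤ t) :
    ∀ (k : Nat) (j : Int), 0 < k → 0 ≤ j → j + k = ng →
      (PySem.List.pyRange j ng 1).map (fun i =>
        PySem.Set.ofList (PySem.List.slice xs (some (i * t))
          (some (if i < ng - 1 then i * t + t else (xs.length : Int)))))
      = csspBuild t (xs.drop (j * t).toNat) (k : Int) := by
  intro k
  induction k with
  | zero => intro j hk _ _; omega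
  | succ k ih =>
    intro j hk hj hsum
    have hjt : 0 ≤ j * t := mul_nonneg hj ht
    rcases Nat.eq_zero_or_pos k with hk0 | hkpos
    · subst hk0
      have hng : ng = j + 1 := by omega
      subst hng
      rw [PySem.List.pyRange_one_singleton, csspBuild]
      rw [dif_neg (by omega), dif_pos (by norm_num)]
      simp only [List.map_cons, List.map_nil]
      rw [if_neg (by omega)]
      rw [PySem.List.slice_toNat xs hjt (by positivity)]
      congr 2
      apply List.take_of_length_le
      simp only [List.length_drop]
      omega
    · have hlt : j < ng := by omega
      rw [PySem.List.pyRange_one_cons hlt, csspBuild]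
      rw [dif_neg (by omega), dif_neg (by omega)]
      simp only [List.map_cons]
      congr 1
      · rw [if_pos (by omega)]
        rw [PySem.List.slice_toNat xs hjt (by omega), PySem.List.slice_to _ ht]
        have he : (j * t + t).toNat - (j * t).toNat = t.toNat := by omega
        rw [he]
      · have harith : (j + 1) * t = j * t + t := by ring
        have h := ih (j + 1) hkpos (by omega) (by omega)
        rw [harith] at h
        rw [h, PySem.List.slice_from _ ht, List.drop_drop]
        have he : (j * t + t).toNat = t.toNat + (j * t).toNat := by omega
        have hc : ((k + 1 : Nat) : Int) - 1 = (k : Int) := by push_cast; ring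
        rw [he, hc, Nat.add_comm]

-- A's foldl appending singletons is a map over the range.
lemma cssp_foldl_eq_map (token_ids : List Int) (num_groups t : Int) :
    (PySem.List.pyRange 0 num_groups 1).foldl
      (fun sub_clusters i =>
        sub_clusters ++ [PySem.Set.ofList (PySem.List.slice token_ids (some (i * t))
          (some (if i < num_groups - 1 then i * t + t else (token_ids.length : Int))))]) []
    = (PySem.List.pyRange 0 num_groups 1).map (fun i =>
        PySem.Set.ofList (PySem.List.slice token_ids (some (i * t))
          (some (if i < num_groups - 1 then i * t + t else (token_ids.length : Int))))) := by
  simpa using PySem.List.foldl_append_singleton_eq_map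
    (fun i => PySem.Set.ofList (PySem.List.slice token_ids (some (i * t))
      (some (if i < num_groups - 1 then i * t + t else (token_ids.length : Int)))))
    (PySem.List.pyRange 0 num_groups 1) []

-- ===== VERDICT (by name: the statement is the Claim_ definition above) =====
theorem create_sub_specializations_py_spec : Claim_equal_create_sub_specializations_py := by
  intro token_ids flash_scanner num_groups _ hpre
  unfold Spec_create_sub_specializations_py create_sub_specializations_py create_sub_specializations_py_alt
  simp only []
  rcases lt_trichotomy num_groups 0 with hneg | hz | hpos
  · rw [PySem.List.pyRange_one_eq_nil (by omega)]
    rw [csspBuild]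
    simp [hneg.le]
  · exact absurd hz hpre
  · have ht : 0 ≤ PySem.Int.floordiv (token_ids.length : Int) num_groups := by
      rw [PySem.Int.floordiv_eq_ediv_of_pos hpos]
      exact Int.ediv_nonneg (by positivity) hpos.le
    rw [cssp_foldl_eq_map]
    have h := cssp_build_eq token_ids num_groups _ ht num_groups.toNat 0 (by omega) le_rfl (by omega)
    rw [Int.toNat_of_nonneg hpos.le] at h
    simpa using h
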